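-- pv_equiv track=rewrite | github.com/Jeff-Lowrey/leet_code | solutions/sorting/python/0324-wiggle-sort-ii.py | verify_wiggle
-- ===== SOURCE A (Python) =====
-- from typing import List
--
-- def verify_wiggle(nums: List[int]) -> bool:
--     """Verify if array satisfies wiggle property."""
--     for i in range(len(nums) - 1):
--         if i % 2 == 0:
--             # Even index: nums[i] < nums[i+1]
--             if nums[i] >= nums[i + 1]:
--                 return False
--         else:
--             # Odd index: nums[i] > nums[i+1]
--             if nums[i] <= nums[i + 1]:
--                 return False
--     return True
-- ===== SOURCE B (Python) =====
-- from typing import List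
--
-- def verify_wiggle(nums: List[int]) -> bool:
--     """Verify if array satisfies wiggle property."""
--     evens = nums[0::2]
--     odds = nums[1::2]
--     rest = nums[2::2]
--     return all(a < b for a, b in zip(evens, odds)) and \
--            all(a > b for a, b in zip(odds, rest))
-- ===== Notes on version B (the rewrite author's own statement) =====
-- stated objective: simpler
-- what changed: Replaces the indexed loop with its i%2 branch by two independent slice-based passes: zip the even-index slice with the odd-index slice and require <, zip the odd-index slice with the rest and require >, returning the conjunction.
import Mathlib
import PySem

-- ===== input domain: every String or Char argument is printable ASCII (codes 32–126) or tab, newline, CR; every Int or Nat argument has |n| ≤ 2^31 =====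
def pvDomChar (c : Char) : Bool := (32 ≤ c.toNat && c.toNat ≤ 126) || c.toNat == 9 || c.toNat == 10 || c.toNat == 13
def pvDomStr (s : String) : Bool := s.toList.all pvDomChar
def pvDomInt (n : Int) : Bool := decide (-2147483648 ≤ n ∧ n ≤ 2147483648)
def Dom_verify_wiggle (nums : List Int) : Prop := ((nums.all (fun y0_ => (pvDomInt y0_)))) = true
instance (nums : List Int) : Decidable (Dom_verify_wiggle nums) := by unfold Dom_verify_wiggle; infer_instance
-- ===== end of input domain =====

-- B replaces A's indexed loop with its i%2 branch by two independent slice-zip passes (evens<odds, odds>rest); objective: simpler.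


-- ===== PORT A =====
-- the 'for i in range(len(nums)-1)' loop with its early returns, as recursion over the range list
def verifyWiggleLoop (nums : List Int) : List Int → Bool
  | [] => true
  | i :: rest =>
    if i % 2 == 0 then
      -- Even index: nums[i] < nums[i+1]
      if PySem.List.pyGetD nums i 0 ≥ PySem.List.pyGetD nums (i + 1) 0 then false
      else verifyWiggleLoop nums rest
    else
      -- Odd index: nums[i] > nums[i+1]
      if PySem.List.pyGetD nums i 0 ≤ PySem.List.pyGetD nums (i + 1) 0 then false
      else verifyWiggleLoop nums rest

def verify_wiggle (nums : List Int) : Bool :=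
  verifyWiggleLoop nums (PySem.List.pyRange 0 ((nums.length : Int) - 1))

-- ===== PORT B =====
-- nums[k::2] is ported by hand as everyOther (nums.drop k): exact for a step-2 slice with nonnegative start k
def everyOther : List Int → List Int
  | [] => []
  | [x] => [x]
  | x :: _ :: t => x :: everyOther t

def verify_wiggle_alt (nums : List Int) : Bool :=
  let evens := everyOther nums            -- nums[0::2]
  let odds  := everyOther (nums.drop 1)   -- nums[1::2]
  let rest  := everyOther (nums.drop 2)   -- nums[2::2]
  ((evens.zip odds).all (fun p => decide (p.1 < p.2))) &&
  ((odds.zip rest).all (fun p => decide (p.1 > p.2)))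

-- ===== PRECONDITION & SPEC =====
def Spec_verify_wiggle (nums : List Int) (out : Bool) : Prop := out = verify_wiggle_alt nums
instance (nums : List Int) (out : Bool) : Decidable (Spec_verify_wiggle nums out) := by unfold Spec_verify_wiggle; infer_instance

-- ===== CLAIM (what is proved, stated in full; the proofs are below) =====
def Claim_equal_verify_wiggle : Prop := ∀ (nums : List Int), Dom_verify_wiggle nums → Spec_verify_wiggle nums (verify_wiggle nums)

-- ===== LEMMAS AND PROOFS =====

-- common specification: alternating chain check with an expectation flag (true = expect <)
def wig : Bool → List Int → Bool
  | _, [] => true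
  | _, [_] => true
  | b, x :: y :: t => (if b then decide (x < y) else decide (x > y)) && wig (!b) (y :: t)

-- B with the two comparisons flipped (what B becomes after consuming one element)
def bDown (ns : List Int) : Bool :=
  (((everyOther ns).zip (everyOther (ns.drop 1))).all (fun p => decide (p.1 > p.2))) &&
  (((everyOther (ns.drop 1)).zip (everyOther (ns.drop 2))).all (fun p => decide (p.1 < p.2)))

theorem everyOther_cons (x : Int) (t : List Int) :
    everyOther (x :: t) = x :: everyOther (t.drop 1) := by
  cases t <;> rfl

theorem alt_eq_wig : ∀ ns : List Int,
    verify_wiggle_alt ns = wig true ns ∧ bDown ns = wig false ns := by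
  intro ns
  induction ns with
  | nil => constructor <;> rfl
  | cons x r ih =>
    cases r with
    | nil => constructor <;> rfl
    | cons y r' =>
      obtain ⟨ih1, ih2⟩ := ih
      constructor
      · show verify_wiggle_alt (x :: y :: r') = wig true (x :: y :: r')
        rw [show wig true (x :: y :: r') = (decide (x < y) && wig false (y :: r')) by
          simp [wig]]
        rw [← ih2]
        simp only [verify_wiggle_alt, bDown, everyOther, everyOther_cons, List.drop,
          List.zip_cons_cons, List.all_cons]
        ac_rfl
      · show bDown (x :: y :: r') = wig false (x :: y :: r')
        rw [show wig false (x :: y :: r') = (decide (x > y) && wig true (y :: r')) by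
          simp [wig]]
        rw [← ih1]
        simp only [verify_wiggle_alt, bDown, everyOther, everyOther_cons, List.drop,
          List.zip_cons_cons, List.all_cons]
        ac_rfl

theorem wig_short (b : Bool) (ns : List Int) (h : ns.length ≤ 1) : wig b ns = true := by
  cases ns with
  | nil => rfl
  | cons x t =>
    cases t with
    | nil => rfl
    | cons y t' => simp at h

theorem loop_eq_wig (nums : List Int) : ∀ (k j : Nat), nums.length - j ≤ k →
    verifyWiggleLoop nums (PySem.List.pyRange (j : Int) ((nums.length : Int) - 1))
      = wig (j % 2 == 0) (nums.drop j) := by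
  intro k
  induction k with
  | zero =>
    intro j hk
    have hempty : PySem.List.pyRange (j : Int) ((nums.length : Int) - 1) = [] := by
      rw [List.eq_nil_iff_forall_not_mem]
      intro i hi
      rw [PySem.List.mem_pyRange_one] at hi
      omega
    rw [hempty, wig_short _ _ (by rw [List.length_drop]; omega)]
    rfl
  | succ k ihk =>
    intro j hk
    by_cases h : j + 1 < nums.length
    · have hlt : (j : Int) < (nums.length : Int) - 1 := by omega
      have hcast : (j : Int) + 1 = ((j + 1 : Nat) : Int) := by omega
      have hget1 : PySem.List.pyGetD nums (j : Int) 0 = nums[j]'(by omega) := by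
        rw [PySem.List.pyGetD_natCast]
        exact List.getD_eq_getElem nums 0 (by omega)
      have hget2 : PySem.List.pyGetD nums ((j : Int) + 1) 0 = nums[j + 1]'h := by
        rw [hcast, PySem.List.pyGetD_natCast]
        exact List.getD_eq_getElem nums 0 h
      have hdropj : nums.drop j = nums[j]'(by omega) :: nums.drop (j + 1) :=
        List.drop_eq_getElem_cons (by omega)
      have hdropj1 : nums.drop (j + 1) = nums[j + 1]'h :: nums.drop (j + 2) :=
        List.drop_eq_getElem_cons h
      have hrec : verifyWiggleLoop nums (PySem.List.pyRange ((j : Int) + 1) ((nums.length : Int) - 1))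
          = wig ((j + 1) % 2 == 0) (nums.drop (j + 1)) := by
        rw [hcast]; exact ihk (j + 1) (by omega)
      have hflip : (((j + 1) % 2 == 0) : Bool) = !(j % 2 == 0) := by
        rcases Nat.mod_two_eq_zero_or_one j with h2 | h2
        · have h3 : (j + 1) % 2 = 1 := by omega
          simp [h2, h3]
        · have h3 : (j + 1) % 2 = 0 := by omega
          simp [h2, h3]
      have hmod : (((j : Int) % 2 == 0) : Bool) = (j % 2 == 0) := by
        have hc : (j : Int) % 2 = ((j % 2 : Nat) : Int) := by omega
        rcases Nat.mod_two_eq_zero_or_one j with h2 | h2 <;> simp [hc, h2]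
      rw [PySem.List.pyRange_one_cons hlt]
      simp only [verifyWiggleLoop, ge_iff_le]
      rw [hmod, hget1, hget2, hrec, hflip, hdropj, hdropj1]
      simp only [wig]
      by_cases hp : j % 2 = 0
      · simp only [hp, beq_self_eq_true, if_true]
        by_cases hle : nums[j + 1]'h ≤ nums[j]'(by omega)
        · simp [hle, show ¬ (nums[j]'(by omega) < nums[j + 1]'h) by omega]
        · simp [hle, show nums[j]'(by omega) < nums[j + 1]'h by omega]
      · have hp1 : j % 2 = 1 := by omega
        simp only [hp1]
        by_cases hle : nums[j]'(by omega) ≤ nums[j + 1]'h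
        · simp [hle, show ¬ (nums[j]'(by omega) > nums[j + 1]'h) by omega]
        · simp [hle, show nums[j]'(by omega) > nums[j + 1]'h by omega]
    · have hempty : PySem.List.pyRange (j : Int) ((nums.length : Int) - 1) = [] := by
        rw [List.eq_nil_iff_forall_not_mem]
        intro i hi
        rw [PySem.List.mem_pyRange_one] at hi
        omega
      rw [hempty, wig_short _ _ (by rw [List.length_drop]; omega)]
      rfl

-- ===== VERDICT (by name: the statement is the Claim_ definition above) =====
theorem verify_wiggle_spec : Claim_equal_verify_wiggle := by
  intro nums _
  show verify_wiggle nums = verify_wiggle_alt nums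
  have h0 : verify_wiggle nums = wig true nums := by
    have h := loop_eq_wig nums nums.length 0 (by omega)
    simpa [verify_wiggle] using h
  rw [h0, (alt_eq_wig nums).1]
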